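-- pv_equiv track=rewrite | github.com/xiaomin418/xmMasterFirst | oj_2/first/last3.py | bigcompute
-- ===== SOURCE A (Python) =====
-- def bigcompute(m,n,base,i):
--     if i==-1:
--         return 1
--
--     temp=1
--     cur_res=1
--     # import pdb
--     # pdb.set_trace()
--     for k in range(10):
--         temp=temp*base%1000
--         if k==int(n[i])-1:
--             cur_res=temp
--
--     return cur_res*bigcompute(m,n,temp,i-1)%1000
-- ===== SOURCE B (Python) =====
-- def bigcompute(m, n, base, i):
--     # iterative: running product and running base instead of recursion + inner multiply loop
--     result = 1
--     b = base
--     for j in range(i, -1, -1):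
--         result = result * pow(b, int(n[j]), 1000) % 1000
--         b = pow(b, 10, 1000)
--     return result
-- ===== Notes on version B (the rewrite author's own statement) =====
-- stated objective: simpler
-- what changed: Replaces A's recursion over the digit index and its fixed 10-iteration multiply loop per digit with a single iterative loop that maintains a running product and a running base via pow(b, digit, 1000).
import Mathlib
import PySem

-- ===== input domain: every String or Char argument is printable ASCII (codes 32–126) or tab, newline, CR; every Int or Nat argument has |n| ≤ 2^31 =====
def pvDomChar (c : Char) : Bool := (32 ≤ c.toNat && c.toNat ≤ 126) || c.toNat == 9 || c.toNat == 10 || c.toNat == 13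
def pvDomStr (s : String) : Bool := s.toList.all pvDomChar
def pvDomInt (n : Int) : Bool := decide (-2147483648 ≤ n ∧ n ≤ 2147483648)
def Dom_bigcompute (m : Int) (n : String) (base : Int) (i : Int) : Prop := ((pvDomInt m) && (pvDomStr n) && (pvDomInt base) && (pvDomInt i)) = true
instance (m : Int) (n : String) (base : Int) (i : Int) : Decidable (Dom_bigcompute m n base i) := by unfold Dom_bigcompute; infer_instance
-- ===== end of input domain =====

-- B replaces A's recursion over the digit index (with a fixed 10-step multiply loop per digit)
-- by a single iterative loop maintaining a running product and a running base via pow(b, d, 1000).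


-- ===== PORT A =====
-- int(n[j]) as both Pythons compute it: the character at (possibly negative) index j, parsed
-- by int(); 0 where Python would raise (IndexError / ValueError) — excluded by Pre_bigcompute.
def pyDigit (n : String) (j : Int) : Int :=
  match PySem.Str.pyGet? n j with
  | some c => (PySem.Int.ofChars? [c]).getD 0
  | none => 0

-- A's recursion, fuel-guarded (fuel = number of recursive steps; exact when -1 ≤ i; for
-- i < -1 Python never returns, so the 0-fuel value is never claimed about).
def bigcomputeRec (m : Int) (n : String) (base : Int) (i : Int) : Nat → Int
  | 0 => if i = -1 then 1 else 0
  | fuel+1 =>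
    if i = -1 then 1
    else
      let d := pyDigit n i
      let st := (List.range 10).foldl
        (fun (s : Int × Int) (k : Nat) =>
          let temp := PySem.Int.mod (s.1 * base) 1000
          (temp, if (k : Int) = d - 1 then temp else s.2)) (1, 1)
      PySem.Int.mod (st.2 * bigcomputeRec m n st.1 (i-1) fuel) 1000

def bigcompute (m : Int) (n : String) (base : Int) (i : Int) : Int :=
  bigcomputeRec m n base i (i+1).toNat

-- ===== PORT B =====
-- pow(b, d, 1000) is PySem.Int.powMod; d = int(n[j]) is a digit value on Pre_, so .toNat is exact.
def bigcompute_alt (m : Int) (n : String) (base : Int) (i : Int) : Int :=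
  ((PySem.List.pyRange i (-1) (-1)).foldl
    (fun (s : Int × Int) j =>
      (PySem.Int.mod (s.1 * PySem.Int.powMod s.2 (pyDigit n j).toNat 1000) 1000,
       PySem.Int.powMod s.2 10 1000)) (1, base)).1

-- ===== PRECONDITION & SPEC =====
-- Exactly the inputs on which the Python A returns: for i ≥ 0 it reads n[i], n[i-1], …, n[0]
-- (IndexError unless i < len(n); ValueError unless each is a digit character); for i < -1 the
-- recursion keeps decrementing i and always ends in IndexError or ValueError.
def Pre_bigcompute (m : Int) (n : String) (base : Int) (i : Int) : Prop :=
  -1 ≤ i ∧ i < (n.toList.length : Int) ∧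
    ((n.toList.take (i+1).toNat).all
      (fun c => decide (c ∈ ['0','1','2','3','4','5','6','7','8','9']))) = true
instance (m : Int) (n : String) (base : Int) (i : Int) : Decidable (Pre_bigcompute m n base i) := by
  unfold Pre_bigcompute; infer_instance

def pvWitness_bigcompute : Int × String × Int × Int := (0, "42", 3, 1)

def Spec_bigcompute (m : Int) (n : String) (base : Int) (i : Int) (out : Int) : Prop := out = bigcompute_alt m n base i
instance (m : Int) (n : String) (base : Int) (i : Int) (out : Int) : Decidable (Spec_bigcompute m n base i out) := by unfold Spec_bigcompute; infer_instance

-- ===== CLAIM (what is proved, stated in full; the proofs are below) =====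
def Claim_equal_bigcompute : Prop := ∀ (m : Int) (n : String) (base : Int) (i : Int), Dom_bigcompute m n base i → Pre_bigcompute m n base i → Spec_bigcompute m n base i (bigcompute m n base i)

-- ===== LEMMAS AND PROOFS =====

theorem pymod_eq_emod (x : Int) : PySem.Int.mod x 1000 = x % 1000 :=
  PySem.Int.mod_eq_emod_of_pos (by norm_num)

theorem modmul_left (x y : Int) :
    PySem.Int.mod (PySem.Int.mod x 1000 * y) 1000 = PySem.Int.mod (x * y) 1000 := by
  simp only [pymod_eq_emod]
  rw [Int.mul_emod, Int.emod_emod_of_dvd x dvd_rfl, ← Int.mul_emod]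

theorem modmul_right (x y : Int) :
    PySem.Int.mod (x * PySem.Int.mod y 1000) 1000 = PySem.Int.mod (x * y) 1000 := by
  simp only [pymod_eq_emod]
  rw [Int.mul_emod, Int.emod_emod_of_dvd y dvd_rfl, ← Int.mul_emod]

-- digit characters parse to 0..9
theorem pyDigit_of_digit_char (c : Char)
    (hc : c ∈ ['0','1','2','3','4','5','6','7','8','9']) :
    0 ≤ (PySem.Int.ofChars? [c]).getD 0 ∧ (PySem.Int.ofChars? [c]).getD 0 ≤ 9 := by
  fin_cases hc <;> decide

-- repeated (· * b % 1000) from 1: A's running `temp`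
def mpow (b : Int) : Nat → Int
  | 0 => 1
  | k+1 => PySem.Int.mod (mpow b k * b) 1000

theorem mpow_eq (b : Int) (k : Nat) (hk : 1 ≤ k) :
    mpow b k = PySem.Int.mod (b ^ k) 1000 := by
  induction k with
  | zero => omega
  | succ k ih =>
    rcases Nat.eq_or_lt_of_le hk with h | h
    · have hk0 : k = 0 := by omega
      subst hk0
      simp [mpow]
    · rw [mpow, ih (by omega), modmul_left, pow_succ]

-- A's inner 10-iteration loop, characterised
theorem innerA (b d : Int) (K : Nat) :
    ((List.range K).foldl
      (fun (s : Int × Int) (k : Nat) =>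
        let temp := PySem.Int.mod (s.1 * b) 1000
        (temp, if (k : Int) = d - 1 then temp else s.2)) (1, 1))
    = (mpow b K, if 1 ≤ d ∧ d ≤ (K : Int) then mpow b d.toNat else 1) := by
  induction K with
  | zero =>
    simp only [List.range_zero, List.foldl_nil]
    have h0 : ¬ (1 ≤ d ∧ d ≤ ((0:Nat) : Int)) := by push_cast; omega
    rw [if_neg h0]
    rfl
  | succ K ih =>
    rw [List.range_succ, List.foldl_append, ih]
    simp only [List.foldl_cons, List.foldl_nil]
    by_cases h : (K : Int) = d - 1
    · have h1 : 1 ≤ d ∧ d ≤ ((K+1 : Nat) : Int) := by push_cast; omega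
      have h2 : d.toNat = K + 1 := by omega
      simp [h, h1, h2, mpow]
    · have h2 : (1 ≤ d ∧ d ≤ (K : Int) + 1) ↔ (1 ≤ d ∧ d ≤ (K : Int)) := by omega
      simp only [Nat.cast_add, Nat.cast_one, h2]
      simp [h, mpow]

-- A's per-digit factor equals pow(b, d, 1000) for digit values 0..9
theorem curres_eq (b d : Int) (h0 : 0 ≤ d) (h9 : d ≤ 9) :
    (if 1 ≤ d ∧ d ≤ ((10:Nat) : Int) then mpow b d.toNat else 1)
      = PySem.Int.powMod b d.toNat 1000 := by
  rcases eq_or_lt_of_le h0 with h | h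
  · have hn : ¬ (1 ≤ d ∧ d ≤ ((10:Nat) : Int)) := by omega
    rw [PySem.Int.powMod_eq, if_neg hn]
    simp [← h]
  · have hc : 1 ≤ d ∧ d ≤ ((10:Nat) : Int) := by push_cast; omega
    rw [PySem.Int.powMod_eq, if_pos hc, mpow_eq b d.toNat (by omega)]

-- digit bounds at every position the loop touches, from Pre_
theorem pyDigit_bounds (n : String) (i j : Int)
    (hlen : i < (n.toList.length : Int))
    (hdig : ∀ c ∈ n.toList.take (i+1).toNat, c ∈ ['0','1','2','3','4','5','6','7','8','9'])
    (h0 : 0 ≤ j) (hj : j ≤ i) :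
    0 ≤ pyDigit n j ∧ pyDigit n j ≤ 9 := by
  have hjl : j < (n.toList.length : Int) := by omega
  have hget : PySem.Str.pyGet? n j = some (n.toList[j.toNat]'(by omega)) := by
    have hb : PySem.Str.pyGet? n j = PySem.List.pyGet? n.toList j := by simp [pysem]
    rw [hb, PySem.List.pyGet?_eq_some_getElem n.toList h0 hjl]
  have hmem : n.toList[j.toNat]'(by omega) ∈ n.toList.take (i+1).toNat := by
    have hjt : j.toNat < (i+1).toNat := by omega
    have hgt := List.getElem_take (xs := n.toList) (i := j.toNat)
      (h := by rw [List.length_take]; omega) (j := (i+1).toNat)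
    rw [← hgt]
    exact List.getElem_mem _
  have hb := pyDigit_of_digit_char _ (hdig _ hmem)
  unfold pyDigit
  rw [hget]
  exact hb

-- A's recursion at positive fuel and i ≠ -1 is already reduced mod 1000
theorem bigcomputeRec_mod (m : Int) (n : String) (b i : Int) (k : Nat) (hi : i ≠ -1) :
    PySem.Int.mod (bigcomputeRec m n b i (k+1)) 1000 = bigcomputeRec m n b i (k+1) := by
  rw [bigcomputeRec, if_neg hi]
  simp only [pymod_eq_emod]
  exact Int.emod_emod_of_dvd _ dvd_rfl

-- the main loop invariant: B's fold from (r, b) over [k, k-1, …, 0] equals r times A's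
-- recursion from base b at index k, mod 1000
theorem mainloop (m : Int) (n : String) (i : Int)
    (hlen : i < (n.toList.length : Int))
    (hdig : ∀ c ∈ n.toList.take (i+1).toNat, c ∈ ['0','1','2','3','4','5','6','7','8','9']) :
    ∀ (k : Nat), (k : Int) ≤ i → ∀ (b r : Int),
    ((PySem.List.pyRange (k : Int) (-1) (-1)).foldl
      (fun (s : Int × Int) j =>
        (PySem.Int.mod (s.1 * PySem.Int.powMod s.2 (pyDigit n j).toNat 1000) 1000,
         PySem.Int.powMod s.2 10 1000)) (r, b)).1
    = PySem.Int.mod (r * bigcomputeRec m n b (k : Int) (k+1)) 1000 := by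
  intro k
  induction k with
  | zero =>
    intro hki b r
    have hd := pyDigit_bounds n i 0 hlen hdig (by omega) (by exact_mod_cast hki)
    rw [PySem.List.pyRange_neg_one_cons (by norm_num),
        PySem.List.pyRange_neg_one_eq_nil (by norm_num)]
    simp only [List.foldl_cons, List.foldl_nil]
    rw [bigcomputeRec]
    rw [if_neg (by norm_num)]
    simp only [innerA]
    rw [Nat.cast_zero, curres_eq b _ hd.1 hd.2]
    rw [show bigcomputeRec m n (mpow b 10) (0 - 1) 0 = 1 from by rw [bigcomputeRec]; norm_num]
    rw [mul_one, modmul_right]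
  | succ K ih =>
    intro hki b r
    have hcast : ((K+1 : Nat) : Int) = (K : Int) + 1 := by push_cast; ring
    have hd := pyDigit_bounds n i ((K+1 : Nat) : Int) hlen hdig (by omega) hki
    rw [PySem.List.pyRange_neg_one_cons (by omega)]
    simp only [List.foldl_cons]
    rw [show ((K+1 : Nat) : Int) - 1 = (K : Int) by omega]
    rw [ih (by omega)]
    conv_rhs => rw [bigcomputeRec]
    rw [if_neg (show ¬ ((K+1 : Nat) : Int) = -1 by omega)]
    simp only [innerA]
    rw [curres_eq b _ hd.1 hd.2]
    rw [show mpow b 10 = PySem.Int.powMod b 10 1000 from by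
      rw [mpow_eq b 10 (by norm_num), PySem.Int.powMod_eq]]
    rw [show ((K+1 : Nat) : Int) - 1 = (K : Int) by omega]
    rw [modmul_left, modmul_right, mul_assoc]

-- ===== VERDICT (by name: the statement is the Claim_ definition above) =====
theorem bigcompute_spec : Claim_equal_bigcompute := by
  intro m n base i _hdom hpre
  obtain ⟨h1, h2, h3⟩ := hpre
  replace h3 : ∀ c ∈ n.toList.take (i+1).toNat, c ∈ ['0','1','2','3','4','5','6','7','8','9'] := by
    simpa [List.all_eq_true] using h3
  unfold Spec_bigcompute bigcompute bigcompute_alt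
  rcases eq_or_lt_of_le h1 with h | h
  · rw [← h]
    rw [PySem.List.pyRange_neg_one_eq_nil (by norm_num)]
    rw [show ((-1 : Int) + 1).toNat = 0 from rfl, bigcomputeRec, if_pos rfl]
    rfl
  · have hi0 : 0 ≤ i := by omega
    have hk : i = ((i.toNat : Nat) : Int) := by omega
    rw [hk]
    rw [show (((i.toNat : Nat) : Int) + 1).toNat = i.toNat + 1 from by omega]
    rw [mainloop m n i h2 h3 i.toNat (by omega) base 1]
    rw [one_mul, bigcomputeRec_mod m n base _ i.toNat (by omega)]
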